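-- pv_equiv track=rewrite | github.com/rkarthi2310/CS6230-CadForVLSI-Project1 | verification_unpipelined/test_patterns.py | generate_sliding_ones
-- ===== SOURCE A (Python) =====
-- def generate_sliding_ones(n, window_size=2):
--     """
--     Generate n-bit sliding ones pattern with specified window size.
--     Example for n=4, window_size=2: 0011, 0110, 1100
--     """
--     if window_size > n:
--         raise ValueError("Window size cannot be larger than n")
--
--     patterns = []
--     # Create initial pattern with 'window_size' number of 1s
--     initial_pattern = (1 << window_size) - 1
--
--     for i in range(n - window_size + 1):
--         pattern = initial_pattern << i
--         patterns.append(format(pattern, f'0{n}b'))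
--     return patterns
-- ===== SOURCE B (Python) =====
-- def generate_sliding_ones(n, window_size=2):
--     if window_size > n:
--         raise ValueError("Window size cannot be larger than n")
--     if window_size < 0:
--         raise ValueError("Window size cannot be negative")
--     current = '0' * (n - window_size) + '1' * window_size
--     patterns = [current]
--     for _ in range(n - window_size):
--         current = current[1:] + '0'
--         patterns.append(current)
--     return patterns
-- ===== Notes on version B (the rewrite author's own statement) =====
-- stated objective: alternative
-- what changed: B builds the first pattern once as a string and slides the window by dropping the leading char and appending a '0' each iteration, instead of recomputing every pattern from an integer shift plus binary formatting.
-- intended difference: On n=0, window_size=0 A returns ['0'] because Python's format emits at least one digit even for width 0, while B returns [''], the correct zero-length 0-bit pattern. — e.g. on generate_sliding_ones(0, 0): A returns ["0"], B returns [""]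
import Mathlib
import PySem

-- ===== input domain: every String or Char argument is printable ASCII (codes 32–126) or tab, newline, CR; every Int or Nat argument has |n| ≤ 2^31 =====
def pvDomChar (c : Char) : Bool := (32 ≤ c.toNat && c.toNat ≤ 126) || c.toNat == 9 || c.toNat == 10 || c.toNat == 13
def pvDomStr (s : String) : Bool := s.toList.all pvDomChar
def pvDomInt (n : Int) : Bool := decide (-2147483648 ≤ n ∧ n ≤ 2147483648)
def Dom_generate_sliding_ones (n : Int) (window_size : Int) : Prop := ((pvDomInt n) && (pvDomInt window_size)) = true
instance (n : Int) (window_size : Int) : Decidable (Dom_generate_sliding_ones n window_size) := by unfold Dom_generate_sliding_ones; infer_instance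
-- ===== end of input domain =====

-- B builds the first pattern once as a string and slides the window one step per
-- iteration (current[1:] + '0'), instead of recomputing every pattern from an
-- integer shift plus binary formatting (alternative decomposition, same cost).

-- ===== PORT A =====
-- binary digits of a Nat, most significant first (the digit loop inside format(v, 'b'));
-- hand port, exact for v ≥ 0
def pvBinRec : Nat → List Char → List Char
  | 0, acc => acc
  | v + 1, acc => pvBinRec ((v + 1) / 2) ((if (v + 1) % 2 = 1 then '1' else '0') :: acc)
  decreasing_by exact Nat.div_lt_self (Nat.succ_pos v) (by norm_num)

-- format(v, f'0{width}b') for v ≥ 0: binary digits (at least one), zero-padded on the left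
-- to width; hand port, exact on that domain
def pvFormatBin (v : Nat) (width : Int) : String :=
  let digits := if v = 0 then ['0'] else pvBinRec v []
  String.ofList (List.replicate (width - digits.length).toNat '0' ++ digits)

def generate_sliding_ones (n : Int) (window_size : Int) : List String :=
  if window_size > n then []          -- A raises ValueError here (outside Pre_)
  else if window_size < 0 then []     -- A raises ValueError at '1 << window_size' (outside Pre_)
  else
    -- initial_pattern = (1 << window_size) - 1, inlined; pattern = initial_pattern << i
    (PySem.List.pyRange 0 (n - window_size + 1) 1).map
      (fun i => pvFormatBin ((2 ^ window_size.toNat - 1) * 2 ^ i.toNat) n)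

-- ===== PORT B =====
def generate_sliding_ones_alt (n : Int) (window_size : Int) : List String :=
  if window_size > n then []          -- B raises ValueError here (outside Pre_)
  else if window_size < 0 then []     -- B raises ValueError here (outside Pre_)
  else
    -- current = '0' * (n - window_size) + '1' * window_size, inlined into the start state
    ((PySem.List.pyRange 0 (n - window_size) 1).foldl
      (fun (st : String × List String) _ =>
        let c := String.ofList (st.1.toList.drop 1 ++ ['0'])   -- current = current[1:] + '0'
        (c, st.2 ++ [c]))
      (String.ofList (List.replicate (n - window_size).toNat '0' ++
                      List.replicate window_size.toNat '1'),
       [String.ofList (List.replicate (n - window_size).toNat '0' ++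
                       List.replicate window_size.toNat '1')])).2

-- ===== PRECONDITION & SPEC =====
-- A raises ValueError when window_size > n or window_size < 0 (negative shift); B raises there too.
def Pre_generate_sliding_ones (n : Int) (window_size : Int) : Prop :=
  0 ≤ window_size ∧ window_size ≤ n
instance (n : Int) (window_size : Int) : Decidable (Pre_generate_sliding_ones n window_size) := by
  unfold Pre_generate_sliding_ones; infer_instance

def pvWitness_generate_sliding_ones : Int × Int := (4, 2)

-- On n=0, window_size=0 A returns ['0'] because Python's format emits at least one digit even for
-- width 0, while B returns [''], the correct zero-length 0-bit pattern.
def D_generate_sliding_ones (n : Int) (window_size : Int) : Prop := n = 0 ∧ window_size = 0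
instance (n : Int) (window_size : Int) : Decidable (D_generate_sliding_ones n window_size) := by
  unfold D_generate_sliding_ones; infer_instance

def Spec_generate_sliding_ones (n : Int) (window_size : Int) (out : List String) : Prop :=
  ¬ D_generate_sliding_ones n window_size → out = generate_sliding_ones_alt n window_size
instance (n : Int) (window_size : Int) (out : List String) :
    Decidable (Spec_generate_sliding_ones n window_size out) := by
  unfold Spec_generate_sliding_ones; infer_instance

def pvDiffWitness_generate_sliding_ones : Int × Int := (0, 0)
def pvDiffWitnessOut_generate_sliding_ones : (List String) × (List String) := (["0"], [""])

-- ===== CLAIM (what is proved, stated in full; the proofs are below) =====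
def Claim_unchanged_generate_sliding_ones : Prop := ∀ (n : Int) (window_size : Int), Dom_generate_sliding_ones n window_size → Pre_generate_sliding_ones n window_size → Spec_generate_sliding_ones n window_size (generate_sliding_ones n window_size)
def Claim_changed_generate_sliding_ones : Prop := Dom_generate_sliding_ones (pvDiffWitness_generate_sliding_ones.1) (pvDiffWitness_generate_sliding_ones.2) ∧ Pre_generate_sliding_ones (pvDiffWitness_generate_sliding_ones.1) (pvDiffWitness_generate_sliding_ones.2) ∧ D_generate_sliding_ones (pvDiffWitness_generate_sliding_ones.1) (pvDiffWitness_generate_sliding_ones.2) ∧ generate_sliding_ones (pvDiffWitness_generate_sliding_ones.1) (pvDiffWitness_generate_sliding_ones.2) = pvDiffWitnessOut_generate_sliding_ones.1 ∧ generate_sliding_ones_alt (pvDiffWitness_generate_sliding_ones.1) (pvDiffWitness_generate_sliding_ones.2) = pvDiffWitnessOut_generate_sliding_ones.2 ∧ pvDiffWitnessOut_generate_sliding_ones.1 ≠ pvDiffWitnessOut_generate_sliding_ones.2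
def Claim_exact_generate_sliding_ones : Prop := ∀ (n : Int) (window_size : Int), Dom_generate_sliding_ones n window_size → Pre_generate_sliding_ones n window_size → D_generate_sliding_ones n window_size → generate_sliding_ones n window_size ≠ generate_sliding_ones_alt n window_size

-- ===== LEMMAS AND PROOFS =====

-- the common closed form: pattern i of width k with w ones
def pvPat (k w i : Nat) : String :=
  String.ofList (List.replicate (k - w - i) '0' ++ List.replicate w '1' ++ List.replicate i '0')

def pvModel (k w : Nat) : List String := (List.range (k - w + 1)).map (pvPat k w)

theorem pvBinRec_pos (m : Nat) (hm : m ≠ 0) (acc : List Char) :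
    pvBinRec m acc = pvBinRec (m / 2) ((if m % 2 = 1 then '1' else '0') :: acc) := by
  obtain ⟨u, rfl⟩ : ∃ u, m = u + 1 := ⟨m - 1, by omega⟩
  rw [pvBinRec]

theorem pvBinRec_mul_two (v : Nat) (hv : 1 ≤ v) (acc : List Char) :
    pvBinRec (v * 2) acc = pvBinRec v ('0' :: acc) := by
  rw [pvBinRec_pos _ (by omega), show v * 2 / 2 = v by omega, if_neg (by omega)]

theorem pvBinRec_mul_pow (v i : Nat) (hv : 1 ≤ v) (acc : List Char) :
    pvBinRec (v * 2 ^ i) acc = pvBinRec v (List.replicate i '0' ++ acc) := by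
  induction i generalizing acc with
  | zero => simp
  | succ j ih =>
    have h2 : 1 ≤ 2 ^ j := Nat.one_le_two_pow
    rw [pow_succ, ← mul_assoc, pvBinRec_mul_two _ (by nlinarith), ih]
    simp [List.replicate_succ', List.append_assoc]

theorem pvBinRec_ones (w : Nat) (hw : 1 ≤ w) (acc : List Char) :
    pvBinRec (2 ^ w - 1) acc = List.replicate w '1' ++ acc := by
  induction w generalizing acc with
  | zero => omega
  | succ j ih =>
    rcases Nat.eq_zero_or_pos j with hj | hj
    · subst hj; simp [pvBinRec, List.replicate]
    · have h2 : 1 ≤ 2 ^ j := Nat.one_le_two_pow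
      rw [show 2 ^ (j + 1) - 1 = (2 ^ j - 1) * 2 + 1 by rw [pow_succ]; omega]
      rw [pvBinRec_pos _ (by omega), if_pos (by omega),
        show ((2 ^ j - 1) * 2 + 1) / 2 = 2 ^ j - 1 by omega, ih hj]
      simp [List.replicate_succ', List.append_assoc]

-- A's i-th element equals the closed-form pattern (1 ≤ k covers the w = 0 rows)
theorem pvA_elem (k w i : Nat) (hk : 1 ≤ k) (hi : i ≤ k - w) (hw : w ≤ k) :
    pvFormatBin ((2 ^ w - 1) * 2 ^ i) (k : Int) = pvPat k w i := by
  rcases Nat.eq_zero_or_pos w with rfl | hw1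
  · rw [show (2 ^ 0 - 1) * 2 ^ i = 0 by simp]
    unfold pvFormatBin pvPat
    rw [if_pos rfl]
    simp only [List.length_cons, List.length_nil, Nat.cast_one, List.replicate_zero,
      List.append_nil, zero_add]
    rw [show ((k : Int) - 1).toNat = k - 1 by omega]
    congr 1
    rw [show (['0'] : List Char) = List.replicate 1 '0' from rfl,
      ← List.replicate_add, ← List.replicate_add]
    congr 1
    omega
  · have h2 : 2 ≤ 2 ^ w := by
      calc 2 = 2 ^ 1 := by norm_num
      _ ≤ 2 ^ w := Nat.pow_le_pow_right (by norm_num) hw1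
    have hv1 : 1 ≤ 2 ^ w - 1 := by omega
    have hp : 1 ≤ 2 ^ i := Nat.one_le_two_pow
    unfold pvFormatBin pvPat
    rw [if_neg (by nlinarith), pvBinRec_mul_pow _ _ hv1, pvBinRec_ones w hw1]
    simp only [List.append_nil, List.length_append, List.length_replicate, Nat.cast_add]
    rw [show ((k : Int) - ((w : Int) + (i : Int))).toNat = k - w - i by omega]
    rw [List.append_assoc]

-- one slide step
theorem pvPat_step (k w i : Nat) (hi : i < k - w) :
    String.ofList ((pvPat k w i).toList.drop 1 ++ ['0']) = pvPat k w (i + 1) := by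
  unfold pvPat
  congr 1
  rw [String.toList_ofList]
  rw [show k - w - i = (k - w - i - 1) + 1 by omega, show k - w - (i + 1) = k - w - i - 1 by omega]
  rw [List.replicate_succ, List.replicate_succ' (n := i)]
  simp [List.append_assoc]

-- fold invariant for B: folding the slide step over any list of length m starting from
-- pattern j accumulates exactly patterns j+1 … j+m
theorem pvB_fold (l : List Int) (k w j : Nat) (acc : List String)
    (hj : j + l.length = k - w) :
    (l.foldl (fun (st : String × List String) _ =>
        let c := String.ofList (st.1.toList.drop 1 ++ ['0'])
        (c, st.2 ++ [c])) (pvPat k w j, acc)).2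
      = acc ++ (List.range l.length).map (fun t => pvPat k w (j + 1 + t)) := by
  induction l generalizing j acc with
  | nil => simp
  | cons x xs ih =>
    simp only [List.foldl_cons, List.length_cons] at hj ⊢
    rw [pvPat_step k w j (by omega)]
    rw [ih (j + 1) _ (by omega)]
    rw [List.range_succ_eq_map, List.map_cons, List.map_map, List.append_assoc,
      List.singleton_append]
    congr 2
    apply List.map_congr_left
    intro a _
    simp only [Function.comp_apply]
    congr 1
    omega

theorem pvA_eq (n window_size : Int) (h0 : 0 ≤ window_size) (h1 : window_size ≤ n)
    (hk : 1 ≤ n) :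
    generate_sliding_ones n window_size = pvModel n.toNat window_size.toNat := by
  obtain ⟨k, rfl⟩ : ∃ k : Nat, n = (k : Int) := ⟨n.toNat, by omega⟩
  obtain ⟨w, rfl⟩ : ∃ w : Nat, window_size = (w : Int) := ⟨window_size.toNat, by omega⟩
  unfold generate_sliding_ones pvModel
  rw [if_neg (by omega), if_neg (by omega), PySem.List.pyRange_one, List.map_map]
  rw [show (((k : Int) - (w : Int) + 1) - 0).toNat = k - w + 1 by omega]
  rw [Int.toNat_natCast, Int.toNat_natCast]
  apply List.map_congr_left
  intro t ht
  simp only [List.mem_range] at ht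
  simp only [Function.comp_apply, zero_add, Int.toNat_natCast]
  exact pvA_elem k w t (by omega) (by omega) (by omega)

theorem pvB_eq (n window_size : Int) (h0 : 0 ≤ window_size) (h1 : window_size ≤ n) :
    generate_sliding_ones_alt n window_size = pvModel n.toNat window_size.toNat := by
  obtain ⟨k, rfl⟩ : ∃ k : Nat, n = (k : Int) := ⟨n.toNat, by omega⟩
  obtain ⟨w, rfl⟩ : ∃ w : Nat, window_size = (w : Int) := ⟨window_size.toNat, by omega⟩
  have hw : w ≤ k := by omega
  have hinit : String.ofList (List.replicate ((k : Int) - (w : Int)).toNat '0' ++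
      List.replicate ((w : Int)).toNat '1') = pvPat k w 0 := by
    unfold pvPat
    rw [show ((k : Int) - (w : Int)).toNat = k - w - 0 by omega, Int.toNat_natCast]
    simp
  unfold generate_sliding_ones_alt pvModel
  rw [if_neg (by omega), if_neg (by omega), hinit]
  rw [pvB_fold _ k w 0 [pvPat k w 0]
    (by rw [PySem.List.length_pyRange_one]; omega)]
  rw [PySem.List.length_pyRange_one, show (((k : Int) - (w : Int)) - 0).toNat = k - w by omega]
  rw [Int.toNat_natCast, Int.toNat_natCast]
  rw [List.range_succ_eq_map, List.map_cons, List.map_map, List.singleton_append]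
  congr 1
  apply List.map_congr_left
  intro a _
  simp only [Function.comp_apply]
  congr 1
  omega

-- ===== VERDICT (by name: the statement is the Claim_ definition above) =====
theorem generate_sliding_ones_spec : Claim_unchanged_generate_sliding_ones := by
  intro n window_size _ hpre hnd
  obtain ⟨h0, h1⟩ := hpre
  unfold D_generate_sliding_ones at hnd
  have hk : 1 ≤ n := by
    rcases lt_or_ge n 1 with h | h
    · exact absurd (by omega) hnd
    · exact h
  rw [pvA_eq n window_size h0 h1 hk, pvB_eq n window_size h0 h1]

theorem generate_sliding_ones_changed : Claim_changed_generate_sliding_ones := by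
  unfold Claim_changed_generate_sliding_ones; decide

theorem generate_sliding_ones_tight : Claim_exact_generate_sliding_ones := by
  intro n window_size _ _ hd
  obtain ⟨rfl, rfl⟩ := hd
  decide
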